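-- pv_equiv track=rewrite | github.com/SuyashD95/advent-of-code | day-6/day-6-solution.py | char_count_till_end_of_unique_substring
-- ===== SOURCE A (Python) =====
-- from typing import Optional
-- from collections import deque
--
-- def char_count_till_end_of_unique_substring(
--     base_string: str,
--     unique_substr_length: int
-- ) -> Optional[int]:
--     """Returns the number of characters that were required to be searched to
--     find a substring from the provided string where each character is
--     different.
--
--     Parameters
--     ----------
--     base_string: The original string to be searched.
--     unique_substr_length: A natural number greater than 1, representing the
--     length of the unique substring.
--
--     Returns
--     -------
--     Returns no. of characters that were processed in the base string to find
--     a substring of the provided length, where each character is different.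
--
--     In case, no substring is found to be satisfying the uniqueness criterion,
--     the function returns `None`.
--     """
--     substr_window = deque(maxlen=unique_substr_length)
--     for index, char in enumerate(base_string):
--         if index < unique_substr_length:
--             substr_window.append(char)
--             continue
--         if len(set(substr_window)) == unique_substr_length:
--             return index
--         else:
--             substr_window.popleft()
--             substr_window.append(char)
--
--     if len(set(substr_window)) == unique_substr_length:
--         return len(base_string)
-- ===== SOURCE B (Python) =====
-- def char_count_till_end_of_unique_substring(base_string, unique_substr_length):
--     """O(n) sliding window: track last-seen index per char and the start of the
--     longest all-distinct window ending at the current position."""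
--     k = unique_substr_length
--     if k <= 0:
--         # a zero-length window is vacuously all-distinct after 0 characters
--         return 0
--     last_seen = {}
--     start = 0  # base_string[start:i+1] is the longest distinct window ending at i
--     for i, char in enumerate(base_string):
--         j = last_seen.get(char)
--         if j is not None and j >= start:
--             start = j + 1
--         last_seen[char] = i
--         if i + 1 - start >= k:
--             return i + 1
--     return None
-- ===== Notes on version B (the rewrite author's own statement) =====
-- stated objective: faster
-- what changed: A re-scans its k-char deque with len(set(...)) at every position (O(n*k)); B is a single-pass sliding window keeping a last-seen-index map and the start of the longest all-distinct window, so each character is processed in O(1).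
import Mathlib
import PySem

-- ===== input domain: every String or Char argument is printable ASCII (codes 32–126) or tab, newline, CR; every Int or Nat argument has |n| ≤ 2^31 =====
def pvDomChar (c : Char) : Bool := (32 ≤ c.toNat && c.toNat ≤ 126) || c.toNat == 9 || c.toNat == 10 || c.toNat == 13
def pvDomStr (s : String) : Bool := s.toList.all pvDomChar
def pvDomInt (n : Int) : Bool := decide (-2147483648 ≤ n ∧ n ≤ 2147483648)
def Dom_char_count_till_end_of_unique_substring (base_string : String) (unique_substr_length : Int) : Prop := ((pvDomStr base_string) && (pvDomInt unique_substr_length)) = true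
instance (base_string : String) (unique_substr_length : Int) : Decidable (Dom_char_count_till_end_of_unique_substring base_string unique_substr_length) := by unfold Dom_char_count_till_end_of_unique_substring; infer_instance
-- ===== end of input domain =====

-- B replaces A's per-position len(set(window)) re-scan by a one-pass sliding window with a
-- last-seen-index map (objective: faster; a timing run measures the speed-up).


-- ===== PORT A =====
-- deque(maxlen=k).append: when full, the leftmost element is dropped
def pvDequeAppend (k : Int) (w : List Char) (c : Char) : List Char :=
  if k ≤ 0 then [] else if (w.length : Int) = k then w.tail ++ [c] else w ++ [c]

-- the 'for index, char in enumerate(base_string)' loop; n = len(base_string) for the final check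
def pvALoop (k n : Int) : List (Int × Char) → List Char → Option Int
  | [], w => if ((PySem.Set.ofList w).length : Int) = k then some n else none
  | (i, c) :: rest, w =>
    if i < k then pvALoop k n rest (pvDequeAppend k w c)
    else if ((PySem.Set.ofList w).length : Int) = k then some i
    else pvALoop k n rest (pvDequeAppend k w.tail c)   -- popleft() then append(char)

def char_count_till_end_of_unique_substring (base_string : String) (unique_substr_length : Int) : Option Int :=
  pvALoop unique_substr_length (base_string.toList.length : Int)
    (PySem.List.enumerate base_string.toList 0) []

-- ===== PORT B =====
def pvBLoop (k : Int) : List (Int × Char) → PySem.Dict Char Int → Int → Option Int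
  | [], _, _ => none
  | (i, c) :: rest, last_seen, start =>
    let start' : Int := match last_seen.get? c with
      | some j => if start ≤ j then j + 1 else start
      | none => start
    let last' := last_seen.insert c i
    if k ≤ i + 1 - start' then some (i + 1) else pvBLoop k rest last' start'

def char_count_till_end_of_unique_substring_alt (base_string : String) (unique_substr_length : Int) : Option Int :=
  if unique_substr_length ≤ 0 then some 0
  else pvBLoop unique_substr_length (PySem.List.enumerate base_string.toList 0) PySem.Dict.empty 0

-- ===== PRECONDITION & SPEC =====
-- A raises ValueError on unique_substr_length < 0 (deque with a negative maxlen); Pre_ excludes exactly that.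
def Pre_char_count_till_end_of_unique_substring (base_string : String) (unique_substr_length : Int) : Prop :=
  0 ≤ unique_substr_length
instance (base_string : String) (unique_substr_length : Int) : Decidable (Pre_char_count_till_end_of_unique_substring base_string unique_substr_length) := by unfold Pre_char_count_till_end_of_unique_substring; infer_instance

def pvWitness_char_count_till_end_of_unique_substring : String × Int := ("abcabd", 3)

def Spec_char_count_till_end_of_unique_substring (base_string : String) (unique_substr_length : Int) (out : Option Int) : Prop := out = char_count_till_end_of_unique_substring_alt base_string unique_substr_length
instance (base_string : String) (unique_substr_length : Int) (out : Option Int) : Decidable (Spec_char_count_till_end_of_unique_substring base_string unique_substr_length out) := by unfold Spec_char_count_till_end_of_unique_substring; infer_instance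

-- ===== CLAIM (what is proved, stated in full; the proofs are below) =====
def Claim_equal_char_count_till_end_of_unique_substring : Prop := ∀ (base_string : String) (unique_substr_length : Int), Dom_char_count_till_end_of_unique_substring base_string unique_substr_length → Pre_char_count_till_end_of_unique_substring base_string unique_substr_length → Spec_char_count_till_end_of_unique_substring base_string unique_substr_length (char_count_till_end_of_unique_substring base_string unique_substr_length)
-- ===== LEMMAS AND PROOFS =====

-- the common reference value: the first index i with k ≤ i ≤ n whose window cs[i-k:i] is all-distinct
def pvPred (cs : List Char) (k i : Nat) : Bool :=
  decide (k ≤ i) && decide (((cs.take i).drop (i - k)).Nodup)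

def pvRef (cs : List Char) (k : Nat) (j : Nat) : Option Int :=
  ((List.range' j (cs.length + 1 - j)).find? (pvPred cs k)).map (fun i => (i : Int))

-- |set(w)| = |w| iff w has no duplicates
theorem pvSetLen_eq_iff (w : List Char) : (PySem.Set.ofList w).length = w.length ↔ w.Nodup := by
  constructor
  · intro h
    induction w with
    | nil => exact List.nodup_nil
    | cons x xs ih =>
      rw [PySem.Set.ofList_cons] at h
      simp only [List.length_cons] at h
      have hd : ((PySem.Set.ofList xs).discard x).length ≤ (PySem.Set.ofList xs).length :=
        List.length_filter_le _ _
      have hle := PySem.Set.length_ofList_le xs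
      have hlen : (PySem.Set.ofList xs).length = xs.length := by omega
      have hdl : ((PySem.Set.ofList xs).discard x).length = (PySem.Set.ofList xs).length := by omega
      have hnd := ih hlen
      have hx : x ∉ xs := by
        intro hx
        have hx' : x ∈ PySem.Set.ofList xs := (PySem.Set.mem_ofList xs x).mpr hx
        have : ((PySem.Set.ofList xs).filter (fun y => !y == x)).length < (PySem.Set.ofList xs).length := List.length_filter_lt_length_iff_exists.mpr ⟨x, hx', by simp⟩
        unfold PySem.Set.discard at hdl
        omega
      exact List.Nodup.cons hx hnd
  · intro h; rw [PySem.Set.ofList_eq_self_of_nodup w h]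

-- sliding the full k-window one step right
theorem pvWindow_slide (cs : List Char) (k j : Nat) (hk : 1 ≤ k) (hkj : k ≤ j) (hj : j < cs.length) :
    (cs.take (j + 1)).drop (j + 1 - k) = ((cs.take j).drop (j - k)).tail ++ [cs[j]] := by
  have h1 : cs.take (j+1) = cs.take j ++ [cs[j]] := by
    rw [List.take_succ]
    simp [List.getElem?_eq_getElem hj]
  have hlen : (cs.take j).length = j := List.length_take_of_le (le_of_lt hj)
  rw [h1, List.drop_append_of_le_length (by omega), List.tail_drop]
  congr 2
  omega

theorem pvRef_unfold (cs : List Char) (k j : Nat) (h : j ≤ cs.length) :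
    pvRef cs k j = if pvPred cs k j then some (j : Int) else pvRef cs k (j + 1) := by
  unfold pvRef
  have h1 : cs.length + 1 - j = (cs.length - j) + 1 := by omega
  have h2 : cs.length + 1 - (j+1) = cs.length - j := by omega
  rw [h1, h2, List.range'_succ, List.find?_cons]
  cases hp : pvPred cs k j <;> simp

theorem pvRef_of_gt (cs : List Char) (k j : Nat) (h : cs.length < j) : pvRef cs k j = none := by
  unfold pvRef
  have : cs.length + 1 - j = 0 := by omega
  rw [this]; rfl

theorem pvRef_low (cs : List Char) (k : Nat) : ∀ d j, j + d ≤ k → pvRef cs k j = pvRef cs k (j + d) := by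
  intro d
  induction d with
  | zero => intro j _; rfl
  | succ d ih =>
    intro j h
    by_cases hj : j ≤ cs.length
    · rw [pvRef_unfold cs k j hj]
      have hp : pvPred cs k j = false := by
        unfold pvPred
        have : ¬ (k ≤ j) := by omega
        simp [this]
      rw [hp]
      simp only [Bool.false_eq_true, if_false]
      have := ih (j+1) (by omega)
      rw [this]; congr 1; omega
    · rw [pvRef_of_gt cs k j (by omega), pvRef_of_gt cs k (j+(d+1)) (by omega)]

-- membership in a window = an occurrence at an index in [s, j)
theorem pvMemWin (cs : List Char) (s j : Nat) (hj : j ≤ cs.length) (ch : Char) :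
    ch ∈ (cs.take j).drop s ↔ ∃ m, s ≤ m ∧ m < j ∧ cs[m]? = some ch := by
  constructor
  · intro h
    obtain ⟨i, hi, he⟩ := List.mem_iff_getElem.mp h
    refine ⟨s + i, by omega, ?_, ?_⟩
    · have : ((cs.take j).drop s).length = j - s := by simp; omega
      omega
    · rw [List.getElem_drop, List.getElem_take] at he
      rw [List.getElem?_eq_getElem (by
        have : ((cs.take j).drop s).length = j - s := by simp; omega
        omega)]
      exact congrArg some he
  · rintro ⟨m, hsm, hmj, he⟩
    have hm : m < cs.length := by omega
    rw [List.getElem?_eq_getElem hm] at he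
    apply List.mem_iff_getElem.mpr
    have hlen : ((cs.take j).drop s).length = j - s := by simp; omega
    refine ⟨m - s, by omega, ?_⟩
    rw [List.getElem_drop, List.getElem_take]
    rw [← Option.some_inj, ← he]
    have hidx : s + (m - s) = m := by omega
    simp [hidx]

theorem pvGreatest (cs : List Char) (j : Nat) (ch : Char)
    (h : ∃ m, m < j ∧ cs[m]? = some ch) :
    ∃ m, m < j ∧ cs[m]? = some ch ∧ ∀ m', m < m' → m' < j → cs[m']? ≠ some ch := by
  obtain ⟨m, hm, hP⟩ := h
  have hj1 : 1 ≤ j := by omega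
  refine ⟨Nat.findGreatest (fun m => cs[m]? = some ch) (j-1), ?_, ?_, ?_⟩
  · have := Nat.findGreatest_le (P := fun m => cs[m]? = some ch) (j-1)
    omega
  · exact Nat.findGreatest_spec (P := fun m => cs[m]? = some ch) (by omega) hP
  · intro m' h1 h2
    exact Nat.findGreatest_is_greatest (P := fun m => cs[m]? = some ch) h1 (by omega)

theorem pvWinExt (cs : List Char) (j s : Nat) (hjlt : j < cs.length) (hs : s ≤ j) :
    (cs.take (j+1)).drop s = (cs.take j).drop s ++ [cs[j]] := by
  rw [List.take_add_one, List.getElem?_eq_getElem hjlt]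
  simp only [Option.toList_some]
  rw [List.drop_append_of_le_length (by simp; omega)]

def pvHL (cs : List Char) (j : Nat) (last_seen : PySem.Dict Char Int) : Prop :=
  ∀ ch v, last_seen.get? ch = some v ↔
    ∃ m : Nat, v = (m : Int) ∧ m < j ∧ cs[m]? = some ch ∧
      ∀ m', m < m' → m' < j → cs[m']? ≠ some ch

theorem pvALoop_phase2 (cs : List Char) (k : Nat) (hk : 1 ≤ k) :
    ∀ (t : List Char) (j : Nat), cs.drop j = t → k ≤ j → j ≤ cs.length →
      pvALoop (k : Int) (cs.length : Int) (PySem.List.enumerate t (j : Int))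
        ((cs.take j).drop (j - k)) = pvRef cs k j := by
  intro t
  induction t with
  | nil =>
    intro j ht hkj hj
    have hj' : j = cs.length := by
      have := congrArg List.length ht
      simp at this; omega
    subst hj'
    rw [PySem.List.enumerate_nil]
    unfold pvALoop
    rw [List.take_length] at *
    have hwlen : (cs.drop (cs.length - k)).length = k := by
      simp; omega
    rw [pvRef_unfold cs k cs.length (le_refl _), pvRef_of_gt cs k (cs.length+1) (by omega)]
    unfold pvPred
    rw [List.take_length] at *
    by_cases hnd : (cs.drop (cs.length - k)).Nodup
    · have hcond : (PySem.Set.ofList (cs.drop (cs.length - k))).length = k := by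
        rw [(pvSetLen_eq_iff _).mpr hnd, hwlen]
      simp [hcond, hnd, hkj]
    · have hcond : (PySem.Set.ofList (cs.drop (cs.length - k))).length ≠ k := by
        intro he; exact hnd ((pvSetLen_eq_iff _).mp (by rw [he, hwlen]))
      simp [hcond, hnd, hkj]
  | cons c t ih =>
    intro j ht hkj hj
    have hjlt : j < cs.length := by
      have := congrArg List.length ht
      simp at this; omega
    have hct : cs[j] :: cs.drop (j+1) = c :: t := by
      rw [← List.drop_eq_getElem_cons hjlt, ht]
    injection hct with hc ht'
    have hwlen : ((cs.take j).drop (j - k)).length = k := by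
      simp; omega
    rw [PySem.List.enumerate_cons]
    unfold pvALoop
    have hnl : ¬ ((j : Int) < (k : Int)) := by exact_mod_cast not_lt.mpr hkj
    rw [if_neg hnl]
    rw [pvRef_unfold cs k j (le_of_lt hjlt)]
    by_cases hnd : ((cs.take j).drop (j - k)).Nodup
    · have hcond : (PySem.Set.ofList ((cs.take j).drop (j - k))).length = k := by
        rw [(pvSetLen_eq_iff _).mpr hnd, hwlen]
      have hpred : pvPred cs k j = true := by unfold pvPred; simp [hkj, hnd]
      simp [hcond, hpred]
    · have hcond : (PySem.Set.ofList ((cs.take j).drop (j - k))).length ≠ k := by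
        intro he; exact hnd ((pvSetLen_eq_iff _).mp (by rw [he, hwlen]))
      have hpred : pvPred cs k j = false := by unfold pvPred; simp [hnd]
      rw [if_neg (by exact_mod_cast hcond), hpred]
      simp only [Bool.false_eq_true, if_false]
      have hda : pvDequeAppend (k : Int) ((cs.take j).drop (j - k)).tail c
          = (cs.take (j+1)).drop (j+1-k) := by
        unfold pvDequeAppend
        have h1 : ¬ ((k : Int) ≤ 0) := by exact_mod_cast not_le.mpr (by omega : (0:Int) < k)
        have htl : (((cs.take j).drop (j - k)).tail.length : Int) ≠ (k : Int) := by
          have : ((cs.take j).drop (j - k)).tail.length = k - 1 := by simp; omega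
          rw [this]; intro he
          have : k - 1 = k := by exact_mod_cast he
          omega
        rw [if_neg h1, if_neg htl, ← hc, ← pvWindow_slide cs k j hk hkj hjlt]
      rw [hda]
      have hcast : (j : Int) + 1 = ((j + 1 : Nat) : Int) := by push_cast; ring
      rw [hcast]
      exact ih (j+1) ht' (by omega) (by omega)

theorem pvALoop_phase1 (cs : List Char) (k : Nat) (hk : 1 ≤ k) :
    ∀ (t : List Char) (j : Nat), cs.drop j = t → j ≤ k → j ≤ cs.length →
      pvALoop (k : Int) (cs.length : Int) (PySem.List.enumerate t (j : Int)) (cs.take j)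
        = pvRef cs k k := by
  intro t
  induction t with
  | nil =>
    intro j ht hjk hj
    have hj' : j = cs.length := by
      have := congrArg List.length ht; simp at this; omega
    subst hj'
    rw [PySem.List.enumerate_nil]
    unfold pvALoop
    rw [List.take_length]
    by_cases hnk : cs.length < k
    · have hcond : (PySem.Set.ofList cs).length ≠ k := by
        have := PySem.Set.length_ofList_le cs; omega
      rw [pvRef_of_gt cs k k hnk, if_neg (by exact_mod_cast hcond)]
    · have hke : k = cs.length := by omega
      subst hke
      rw [pvRef_unfold cs cs.length cs.length (le_refl _), pvRef_of_gt cs cs.length (cs.length+1) (by omega)]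
      unfold pvPred
      rw [List.take_length, Nat.sub_self, List.drop_zero]
      by_cases hnd : cs.Nodup
      · have hcond : (PySem.Set.ofList cs).length = cs.length := (pvSetLen_eq_iff cs).mpr hnd
        simp [hcond, hnd]
      · have hcond : (PySem.Set.ofList cs).length ≠ cs.length := fun he => hnd ((pvSetLen_eq_iff cs).mp he)
        simp [hcond, hnd]
  | cons c t ih =>
    intro j ht hjk hj
    have hjlt : j < cs.length := by
      have := congrArg List.length ht; simp at this; omega
    have hct : cs[j] :: cs.drop (j+1) = c :: t := by
      rw [← List.drop_eq_getElem_cons hjlt, ht]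
    injection hct with hc ht'
    by_cases hjk' : j < k
    · rw [PySem.List.enumerate_cons]
      unfold pvALoop
      rw [if_pos (by exact_mod_cast hjk')]
      have hda : pvDequeAppend (k : Int) (cs.take j) c = cs.take (j+1) := by
        unfold pvDequeAppend
        have h1 : ¬ ((k : Int) ≤ 0) := by exact_mod_cast not_le.mpr (by omega : (0:Int) < k)
        have htlen : (cs.take j).length = j := List.length_take_of_le (le_of_lt hjlt)
        have h2 : ((cs.take j).length : Int) ≠ (k : Int) := by
          rw [htlen]; intro he
          have : j = k := by exact_mod_cast he
          omega
        rw [if_neg h1, if_neg h2, List.take_add_one, List.getElem?_eq_getElem hjlt]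
        simp [hc]
      rw [hda]
      have hcast : (j : Int) + 1 = ((j + 1 : Nat) : Int) := by push_cast; ring
      rw [hcast]
      exact ih (j+1) ht' (by omega) (by omega)
    · have hjk2 : j = k := by omega
      subst hjk2
      have := pvALoop_phase2 cs j hk (c :: t) j ht (le_refl _) (le_of_lt hjlt)
      rw [Nat.sub_self, List.drop_zero] at this
      exact this

theorem pvBLoop_inv (cs : List Char) (k : Nat) (hk : 1 ≤ k) :
    ∀ (t : List Char) (j : Nat) (last_seen : PySem.Dict Char Int) (start : Nat),
      cs.drop j = t → j ≤ cs.length → start ≤ j →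
      pvHL cs j last_seen →
      ((cs.take j).drop start).Nodup →
      (start = 0 ∨ (1 ≤ start ∧ ∃ ch, cs[start-1]? = some ch ∧ ch ∈ (cs.take j).drop start)) →
      pvBLoop (k : Int) (PySem.List.enumerate t (j : Int)) last_seen (start : Int)
        = pvRef cs k (j + 1) := by
  intro t
  induction t with
  | nil =>
    intro j last_seen start ht hj hs _ _ _
    have hj' : j = cs.length := by
      have := congrArg List.length ht; simp at this; omega
    subst hj'
    rw [PySem.List.enumerate_nil]
    unfold pvBLoop
    rw [pvRef_of_gt cs k (cs.length+1) (by omega)]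
  | cons c t ih =>
    intro j last_seen start ht hj hs HL HN HM
    have hjlt : j < cs.length := by
      have := congrArg List.length ht; simp at this; omega
    have hct : cs[j] :: cs.drop (j+1) = c :: t := by
      rw [← List.drop_eq_getElem_cons hjlt, ht]
    injection hct with hc ht'
    rw [PySem.List.enumerate_cons]
    unfold pvBLoop
    -- determine the new (Nat) start value
    obtain ⟨nstart, hns_eq, hns_le, hns_nodup, hns_max⟩ :
        ∃ nstart : Nat,
          (match last_seen.get? c with
            | some v => if (start : Int) ≤ v then v + 1 else (start : Int)
            | none => (start : Int)) = (nstart : Int) ∧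
          nstart ≤ j + 1 ∧
          ((cs.take (j+1)).drop nstart).Nodup ∧
          (nstart = 0 ∨ (1 ≤ nstart ∧ ∃ ch, cs[nstart-1]? = some ch ∧ ch ∈ (cs.take (j+1)).drop nstart)) := by
      have hwin : ∀ s : Nat, s ≤ j → (cs.take (j+1)).drop s = (cs.take j).drop s ++ [c] := by
        intro s hsle
        rw [pvWinExt cs j s hjlt hsle, hc]
      cases hml : last_seen.get? c with
      | none =>
        refine ⟨start, by simp [hml], by omega, ?_, ?_⟩
        · rw [hwin start hs]
          have hcnm : c ∉ (cs.take j).drop start := by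
            intro hmem
            obtain ⟨m, hm1, hm2, hm3⟩ := (pvMemWin cs start j hj c).mp hmem
            obtain ⟨m0, hm01, hm02, hm03⟩ := pvGreatest cs j c ⟨m, hm2, hm3⟩
            have : last_seen.get? c = some (m0 : Int) :=
              (HL c (m0 : Int)).mpr ⟨m0, rfl, hm01, hm02, hm03⟩
            rw [hml] at this; simpa using this
          simp [List.nodup_append, HN]
          exact fun a ha he => hcnm (he ▸ ha)
        · rcases HM with h0 | ⟨h1, ch, hch1, hch2⟩
          · exact Or.inl h0
          · exact Or.inr ⟨h1, ch, hch1, by rw [hwin start hs]; exact List.mem_append_left _ hch2⟩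
      | some v =>
        obtain ⟨m0, hv, hm0j, hm0c, hm0max⟩ := (HL c v).mp hml
        subst hv
        by_cases hsm : (start : Int) ≤ (m0 : Int)
        · have hsm' : start ≤ m0 := by exact_mod_cast hsm
          refine ⟨m0 + 1, by simp [hml, hsm]; try push_cast; try ring; try omega, by omega, ?_, ?_⟩
          · rw [hwin (m0+1) (by omega)]
            have hnd2 : ((cs.take j).drop (m0+1)).Nodup := by
              have : (cs.take j).drop (m0+1) = ((cs.take j).drop start).drop (m0+1-start) := by
                rw [List.drop_drop]; congr 1; omega
              rw [this]
              exact HN.sublist (List.drop_sublist _ _)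
            have hcnm : c ∉ (cs.take j).drop (m0+1) := by
              intro hmem
              obtain ⟨m, hm1, hm2, hm3⟩ := (pvMemWin cs (m0+1) j hj c).mp hmem
              exact hm0max m (by omega) hm2 hm3
            simp [List.nodup_append, hnd2]
            exact fun a ha he => hcnm (he ▸ ha)
          · refine Or.inr ⟨by omega, c, ?_, ?_⟩
            · simpa using hm0c
            · rw [hwin (m0+1) (by omega)]
              exact List.mem_append_right _ (List.mem_singleton.mpr rfl)
        · refine ⟨start, by simp [hml, hsm], by omega, ?_, ?_⟩
          · rw [hwin start hs]
            have hcnm : c ∉ (cs.take j).drop start := by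
              intro hmem
              obtain ⟨m, hm1, hm2, hm3⟩ := (pvMemWin cs start j hj c).mp hmem
              have hm0m : m0 < m := by
                have : ¬ (start ≤ m0) := fun h => hsm (by exact_mod_cast h)
                omega
              exact hm0max m hm0m hm2 hm3
            simp [List.nodup_append, HN]
            exact fun a ha he => hcnm (he ▸ ha)
          · rcases HM with h0 | ⟨h1, ch, hch1, hch2⟩
            · exact Or.inl h0
            · exact Or.inr ⟨h1, ch, hch1, by rw [hwin start hs]; exact List.mem_append_left _ hch2⟩
    have HL' : pvHL cs (j+1) (last_seen.insert c (j : Int)) := by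
      intro ch v
      rw [PySem.Dict.get?_insert]
      by_cases hch : ch = c
      · subst hch
        rw [if_pos rfl]
        constructor
        · intro hv
          injection hv with hv
          refine ⟨j, hv.symm, by omega, by rw [List.getElem?_eq_getElem hjlt, hc], ?_⟩
          intro m' h1 h2; omega
        · rintro ⟨m, hv, hmj, hmc, hmax⟩
          have hmj' : m = j := by
            by_contra hne
            exact hmax j (by omega) (by omega) (by rw [List.getElem?_eq_getElem hjlt, hc])
          subst hmj'; rw [hv]
      · rw [if_neg hch]
        rw [HL ch v]
        constructor
        · rintro ⟨m, hv, hmj, hmc, hmax⟩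
          refine ⟨m, hv, by omega, hmc, ?_⟩
          intro m' h1 h2
          by_cases hm'j : m' = j
          · subst hm'j
            rw [List.getElem?_eq_getElem hjlt, hc]
            intro he; injection he with he; exact hch he.symm
          · exact hmax m' h1 (by omega)
        · rintro ⟨m, hv, hmj, hmc, hmax⟩
          have hmj' : m ≠ j := by
            intro he; subst he
            rw [List.getElem?_eq_getElem hjlt, hc] at hmc
            injection hmc with hmc; exact hch hmc.symm
          exact ⟨m, hv, by omega, hmc, fun m' h1 h2 => hmax m' h1 (by omega)⟩
    have hcond : ((k : Int) ≤ (j : Int) + 1 - (match last_seen.get? c with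
            | some v => if (start : Int) ≤ v then v + 1 else (start : Int)
            | none => (start : Int))) ↔ pvPred cs k (j+1) = true := by
      rw [hns_eq]
      unfold pvPred
      constructor
      · intro h
        have hks : k + nstart ≤ j + 1 := by omega
        have hkj1 : k ≤ j + 1 := by omega
        have hwnd : ((cs.take (j+1)).drop (j+1-k)).Nodup := by
          have heq : (cs.take (j+1)).drop (j+1-k)
              = ((cs.take (j+1)).drop nstart).drop (j+1-k-nstart) := by
            rw [List.drop_drop]; congr 1; omega
          rw [heq]; exact hns_nodup.sublist (List.drop_sublist _ _)
        simp [hkj1, hwnd]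
      · intro h
        simp only [Bool.and_eq_true, decide_eq_true_eq] at h
        obtain ⟨hkj1, hwnd⟩ := h
        by_contra hlt
        have hns1 : j + 1 < k + nstart := by omega
        have hge1 : 1 ≤ nstart := by omega
        rcases hns_max with h0 | ⟨_, ch, hch1, hch2⟩
        · omega
        · have hidx : nstart - 1 < (cs.take (j+1)).length := by simp; omega
          have hch1' : cs[nstart-1]'(by omega) = ch := by
            have h' : cs[nstart-1]? = some (cs[nstart-1]'(by omega)) := List.getElem?_eq_getElem (by omega)
            rw [h'] at hch1; injection hch1
          have hd1 : (cs.take (j+1)).drop (nstart-1)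
              = ch :: (cs.take (j+1)).drop nstart := by
            rw [List.drop_eq_getElem_cons hidx, List.getElem_take, hch1']
            have hplus : nstart - 1 + 1 = nstart := by omega
            rw [hplus]
          have hnd : ((cs.take (j+1)).drop (nstart-1)).Nodup := by
            have heq : (cs.take (j+1)).drop (nstart-1)
                = ((cs.take (j+1)).drop (j+1-k)).drop (nstart-1-(j+1-k)) := by
              rw [List.drop_drop]; congr 1; omega
            rw [heq]; exact hwnd.sublist (List.drop_sublist _ _)
          rw [hd1] at hnd
          exact (List.nodup_cons.mp hnd).1 hch2
    rw [pvRef_unfold cs k (j+1) (by omega)]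
    by_cases hcd : pvPred cs k (j+1) = true
    · rw [if_pos (hcond.mpr hcd), hcd, if_pos rfl]
      congr 1
      try push_cast
      try ring
      try omega
    · rw [if_neg (fun h => hcd (hcond.mp h))]
      simp only [Bool.not_eq_true] at hcd
      rw [hcd]
      simp only [Bool.false_eq_true, if_false]
      rw [hns_eq]
      have hcast : (j : Int) + 1 = ((j + 1 : Nat) : Int) := by push_cast; ring
      rw [hcast]
      exact ih (j+1) _ nstart ht' (by omega) hns_le HL' hns_nodup hns_max


-- A with k = 0 returns 0 immediately (the empty window is already 'all distinct')
theorem pvALoop_zero (cs : List Char) :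
    pvALoop (0 : Int) (cs.length : Int) (PySem.List.enumerate cs 0) [] = some 0 := by
  cases cs with
  | nil => rfl
  | cons c t =>
    rw [PySem.List.enumerate_cons]
    unfold pvALoop
    norm_num

-- ===== VERDICT (by name: the statement is the Claim_ definition above) =====
theorem char_count_till_end_of_unique_substring_spec : Claim_equal_char_count_till_end_of_unique_substring := by
  intro s k _ hpre
  unfold Spec_char_count_till_end_of_unique_substring
  unfold Pre_char_count_till_end_of_unique_substring at hpre
  unfold char_count_till_end_of_unique_substring char_count_till_end_of_unique_substring_alt
  by_cases hk0 : k ≤ 0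
  · have hke : k = 0 := le_antisymm hk0 hpre
    subst hke
    rw [if_pos (le_refl _)]
    exact pvALoop_zero s.toList
  · rw [if_neg hk0]
    have hk1 : 1 ≤ k.toNat := by omega
    have hkc : (k.toNat : Int) = k := Int.toNat_of_nonneg hpre
    have hA := pvALoop_phase1 s.toList k.toNat hk1 s.toList 0 (by simp) (by omega) (by omega)
    simp only [List.drop_zero, List.take_zero, Nat.cast_zero] at hA
    have hB := pvBLoop_inv s.toList k.toNat hk1 s.toList 0 PySem.Dict.empty 0
      (by simp) (by omega) (le_refl 0)
      (by
        intro ch v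
        rw [PySem.Dict.get?_empty]
        constructor
        · intro h; simp at h
        · rintro ⟨m, _, hm, _⟩; omega)
      (by simp)
      (Or.inl rfl)
    simp only [List.drop_zero, List.take_zero, Nat.cast_zero] at hB
    rw [hkc] at hA hB
    rw [hA, hB]
    have := pvRef_low s.toList k.toNat (k.toNat - 1) 1 (by omega)
    rw [this]
    congr 1
    omega
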